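-- pv_equiv track=rewrite | github.com/liv-yaa/Py_Code_Challenges | med_coding_challenges.py | is_anagram_of_palindrome
-- ===== SOURCE A (Python) =====
-- def is_anagram_of_palindrome(word):
--     """Is the word an anagram of a palindrome?
--     - A palindrome is a word that reads the same forward and backwards (eg, “racecar”, “tacocat”).
--     - An anagram is a rescrambling of a word (eg for “racecar”, you could rescramble this as “arceace”).
--
--     >>> is_anagram_of_palindrome("a")
--     True
--
--     >>> is_anagram_of_palindrome("ab")
--     False
--
--     >>> is_anagram_of_palindrome("aab")
--     True
--
--     >>> is_anagram_of_palindrome("arceace")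
--     True
--
--     >>> is_anagram_of_palindrome("arceaceb")
--     False
--     """
--     # Create a word count dictionary
--     d = {}
--     for char in word:
--         d[char] = d.get(char, 0) + 1
--
--
--     # A palindrome will have a dic that is (all even counts; 0 or 1 only odd count)
--     # not a palindrome will have 2 or more odd counts
--     odd_counts = 0
--
--     for count in d.values():
--         if count % 2 == 1:
--             odd_counts += 1
--
--
--     return (odd_counts < 2)
-- ===== SOURCE B (Python) =====
-- def is_anagram_of_palindrome(word):
--     # One pass tracking only the set of characters seen an odd number of times.
--     odd = set()
--     for char in word:
--         if char in odd:
--             odd.discard(char)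
--         else:
--             odd.add(char)
--     return len(odd) < 2
-- ===== Notes on version B (the rewrite author's own statement) =====
-- stated objective: simpler
-- what changed: Replaces the two-phase build-a-frequency-dict-then-scan-its-values approach with a single pass that toggles each character's membership in a parity set and checks its final size.
import Mathlib
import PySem

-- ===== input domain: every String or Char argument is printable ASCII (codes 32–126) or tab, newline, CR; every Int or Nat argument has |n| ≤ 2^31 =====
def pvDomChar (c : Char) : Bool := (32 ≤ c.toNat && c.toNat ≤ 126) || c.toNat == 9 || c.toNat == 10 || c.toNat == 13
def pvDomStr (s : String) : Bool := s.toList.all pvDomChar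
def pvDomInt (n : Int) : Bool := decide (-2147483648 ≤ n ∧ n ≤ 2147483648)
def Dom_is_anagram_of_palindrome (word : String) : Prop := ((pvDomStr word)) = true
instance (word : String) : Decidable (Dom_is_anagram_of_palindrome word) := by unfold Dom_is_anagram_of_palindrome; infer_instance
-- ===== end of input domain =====

-- B replaces A's count-dictionary plus a second scan over its values with a single pass
-- maintaining the set of odd-parity characters (objective: simpler).

-- ===== PORT A =====
def is_anagram_of_palindrome (word : String) : Bool :=
  let d := word.toList.foldl (fun d c => d.insert c (d.getD c 0 + 1)) PySem.Dict.empty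
  let odd_counts : Int :=
    d.values.foldl (fun n count => if PySem.Int.mod count 2 == 1 then n + 1 else n) 0
  decide (odd_counts < 2)

-- ===== PORT B =====
def is_anagram_of_palindrome_alt (word : String) : Bool :=
  let odd : PySem.Set Char :=
    word.toList.foldl
      (fun s c => if PySem.Set.contains s c then PySem.Set.discard s c else PySem.Set.add s c)
      PySem.Set.empty
  decide (PySem.Set.len odd < 2)

-- ===== PRECONDITION & SPEC =====
def Spec_is_anagram_of_palindrome (word : String) (out : Bool) : Prop := out = is_anagram_of_palindrome_alt word
instance (word : String) (out : Bool) : Decidable (Spec_is_anagram_of_palindrome word out) := by unfold Spec_is_anagram_of_palindrome; infer_instance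

-- ===== CLAIM (what is proved, stated in full; the proofs are below) =====
def Claim_equal_is_anagram_of_palindrome : Prop := ∀ (word : String), Dom_is_anagram_of_palindrome word → Spec_is_anagram_of_palindrome word (is_anagram_of_palindrome word)

-- ===== LEMMAS AND PROOFS =====

-- B's parity fold: the result is duplicate-free and holds exactly the characters with odd count.
theorem parityFold_spec (xs : List Char) :
    (xs.foldl
      (fun s c => if PySem.Set.contains s c then PySem.Set.discard s c else PySem.Set.add s c)
      PySem.Set.empty).Nodup ∧
    ∀ c, c ∈ (xs.foldl
      (fun s c => if PySem.Set.contains s c then PySem.Set.discard s c else PySem.Set.add s c)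
      PySem.Set.empty) ↔ Odd (xs.count c) := by
  induction xs using List.reverseRecOn with
  | nil => simp [PySem.Set.empty]
  | append_singleton xs x ih =>
    obtain ⟨hnd, hmem⟩ := ih
    rw [List.foldl_append, List.foldl_cons, List.foldl_nil]
    set S := xs.foldl
      (fun s c => if PySem.Set.contains s c then PySem.Set.discard s c else PySem.Set.add s c)
      PySem.Set.empty with hS
    by_cases h : PySem.Set.contains S x = true
    · rw [if_pos h]
      rw [PySem.Set.contains_iff] at h
      refine ⟨PySem.Set.nodup_discard _ _ hnd, ?_⟩
      intro c
      rw [PySem.Set.mem_discard, List.count_append, List.count_singleton]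
      rcases eq_or_ne c x with rfl | hne
      · simp [Nat.odd_add_one, ← hmem c, h]
      · simp [hmem c, hne, beq_iff_eq, Ne.symm hne]
    · rw [if_neg h]
      rw [PySem.Set.contains_iff] at h
      refine ⟨PySem.Set.nodup_add _ _ hnd, ?_⟩
      intro c
      rw [PySem.Set.mem_add, List.count_append, List.count_singleton]
      rcases eq_or_ne c x with rfl | hne
      · simp [Nat.odd_add_one, ← hmem c, h]
      · simp [hmem c, hne, beq_iff_eq, Ne.symm hne]

-- The parity test A applies to each count, as a statement about Nat counts.
theorem mod_two_beq_one (n : Nat) : (PySem.Int.mod (n : Int) 2 == 1) = decide (Odd n) := by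
  have h : Int.fmod (n : Int) 2 = ((n % 2 : Nat) : Int) := by
    rw [Int.fmod_eq_emod]; simp
  rcases Nat.mod_two_eq_zero_or_one n with h2 | h2 <;>
    simp [PySem.Int.mod, h, h2, Nat.odd_iff]

-- A's second loop counts the distinct characters of odd count.
theorem oddCounts_eq (xs : List Char) :
    ((xs.foldl (fun d c => d.insert c (d.getD c 0 + 1)) PySem.Dict.empty).values.foldl
      (fun n count => if PySem.Int.mod count 2 == 1 then n + 1 else n) 0 : Int)
    = (((PySem.Set.ofList xs).filter (fun c => decide (Odd (xs.count c)))).length : Int) := by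
  rw [PySem.Dict.foldl_insert_getD_add_one_eq_counter]
  rw [PySem.List.foldl_count_if]
  have hv : (PySem.Dict.counter xs).values
      = List.map (fun k => ((xs.count k : Int))) (PySem.Set.ofList xs) := by
    show (PySem.Dict.counter xs).items.map (·.2) = _
    rw [PySem.Dict.items_counter]
    simp [List.map_map, Function.comp]
  rw [hv, List.countP_map, zero_add, Int.natCast_inj, List.countP_eq_length_filter]
  congr 1
  apply List.filter_congr
  intro c _
  simp only [Function.comp_apply]
  exact mod_two_beq_one (xs.count c)

-- ===== VERDICT (by name: the statement is the Claim_ definition above) =====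
theorem is_anagram_of_palindrome_spec : Claim_equal_is_anagram_of_palindrome := by
  intro word _
  unfold Spec_is_anagram_of_palindrome is_anagram_of_palindrome is_anagram_of_palindrome_alt
  obtain ⟨hnd, hmem⟩ := parityFold_spec word.toList
  have hperm : (word.toList.foldl
      (fun s c => if PySem.Set.contains s c then PySem.Set.discard s c else PySem.Set.add s c)
      PySem.Set.empty).Perm
      ((PySem.Set.ofList word.toList).filter (fun c => decide (Odd (word.toList.count c)))) := by
    rw [List.perm_ext_iff_of_nodup hnd ((PySem.Set.nodup_ofList _).filter _)]
    intro c
    rw [hmem c, List.mem_filter, PySem.Set.mem_ofList]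
    constructor
    · intro h
      refine ⟨?_, by simpa using h⟩
      rcases h with ⟨k, hk⟩
      have : 0 < word.toList.count c := by omega
      exact List.count_pos_iff.mp this
    · intro ⟨_, h⟩; simpa using h
  simp only [oddCounts_eq, PySem.Set.len, hperm.length_eq]
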